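-- pv_equiv track=rewrite | github.com/k-roy/RECTIFY | rectify/core/chimeric_consensus.py | _is_false_3prime_junction
-- ===== SOURCE A (Python) =====
-- def _is_false_3prime_junction(
--     junc_start: int,
--     junc_end: int,
--     seq: str,
--     min_a_tract: int = 3,
-- ) -> bool:
--     """
--     Check if a junction looks like a poly(A) artifact.
--
--     Pattern: A-tract before the junction AND A-tract after = likely false
--     junction where the aligner "jumped" over a genomic region to continue
--     aligning to an A-rich stretch.
--     """
--     if junc_start < 0 or junc_end > len(seq):
--         return False
--
--     # Count trailing A's before junction
--     before = seq[max(0, junc_start - 10):junc_start]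
--     trailing_a = 0
--     for base in reversed(before):
--         if base.upper() == 'A':
--             trailing_a += 1
--         else:
--             break
--
--     # Count leading A's after junction
--     after = seq[junc_end:min(len(seq), junc_end + 10)]
--     leading_a = 0
--     for base in after:
--         if base.upper() == 'A':
--             leading_a += 1
--         else:
--             break
--
--     return trailing_a >= min_a_tract and leading_a >= min_a_tract
-- ===== SOURCE B (Python) =====
-- def _is_false_3prime_junction(
--     junc_start: int,
--     junc_end: int,
--     seq: str,
--     min_a_tract: int = 3,
-- ) -> bool:
--     """Poly(A)-artifact junction test by direct window matching instead of run counting."""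
--     if junc_start < 0 or junc_end > len(seq):
--         return False
--     tract = 'A' * min_a_tract
--     u = seq.upper()
--     return (u[max(0, junc_start - 10):junc_start].endswith(tract)
--             and u[junc_end:junc_end + 10].startswith(tract))
-- ===== Notes on version B (the rewrite author's own statement) =====
-- stated objective: simpler
-- what changed: Replaces A's two run-counting break-loops over the 10-base windows by a loop-free test: uppercase the sequence once, build the literal tract 'A'*min_a_tract, and check that the window before the junction ends with it and the window after starts with it.
import Mathlib
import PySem

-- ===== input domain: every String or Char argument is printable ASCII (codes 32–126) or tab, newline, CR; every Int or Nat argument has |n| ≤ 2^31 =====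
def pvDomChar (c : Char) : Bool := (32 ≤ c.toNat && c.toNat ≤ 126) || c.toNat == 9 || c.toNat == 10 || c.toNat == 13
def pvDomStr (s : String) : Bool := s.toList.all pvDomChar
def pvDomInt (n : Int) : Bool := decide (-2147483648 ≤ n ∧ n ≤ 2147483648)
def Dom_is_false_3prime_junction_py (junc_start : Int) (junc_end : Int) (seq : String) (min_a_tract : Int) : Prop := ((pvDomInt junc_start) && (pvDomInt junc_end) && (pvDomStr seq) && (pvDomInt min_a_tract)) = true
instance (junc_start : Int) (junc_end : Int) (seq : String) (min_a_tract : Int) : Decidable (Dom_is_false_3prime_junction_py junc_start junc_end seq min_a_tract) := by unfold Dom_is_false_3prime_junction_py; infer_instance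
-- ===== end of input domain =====

-- B replaces A's two run-counting break-loops by direct pattern matching: it uppercases the
-- sequence once and asks whether the window before the junction ends with, and the window after
-- the junction starts with, the literal tract 'A' * min_a_tract (objective: simpler).

-- ===== PORT A =====
-- the break-loop 'for base in …: if base.upper() == 'A': n += 1 else: break' as structural recursion
def pvRunA : List Char → Int
  | [] => 0
  | c :: rest => if PySem.Chars.upperChar c == 'A' then 1 + pvRunA rest else 0

def is_false_3prime_junction_py (junc_start : Int) (junc_end : Int) (seq : String) (min_a_tract : Int) : Bool :=
  if junc_start < 0 ∨ junc_end > (seq.toList.length : Int) then false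
  else
    decide (min_a_tract ≤ pvRunA (PySem.List.slice seq.toList (some (max 0 (junc_start - 10))) (some junc_start)).reverse)
      && decide (min_a_tract ≤ pvRunA (PySem.List.slice seq.toList (some junc_end) (some (min (seq.toList.length : Int) (junc_end + 10)))))

-- ===== PORT B =====
def is_false_3prime_junction_py_alt (junc_start : Int) (junc_end : Int) (seq : String) (min_a_tract : Int) : Bool :=
  if junc_start < 0 ∨ junc_end > (seq.toList.length : Int) then false
  else
    let tract := PySem.List.pyRepeat ['A'] min_a_tract
    let u := PySem.Chars.upper seq.toList
    PySem.Chars.endswith (PySem.List.slice u (some (max 0 (junc_start - 10))) (some junc_start)) tract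
      && PySem.Chars.startswith (PySem.List.slice u (some junc_end) (some (junc_end + 10))) tract

-- ===== PRECONDITION & SPEC =====
def Spec_is_false_3prime_junction_py (junc_start : Int) (junc_end : Int) (seq : String) (min_a_tract : Int) (out : Bool) : Prop := out = is_false_3prime_junction_py_alt junc_start junc_end seq min_a_tract
instance (junc_start : Int) (junc_end : Int) (seq : String) (min_a_tract : Int) (out : Bool) : Decidable (Spec_is_false_3prime_junction_py junc_start junc_end seq min_a_tract out) := by unfold Spec_is_false_3prime_junction_py; infer_instance

-- ===== CLAIM (what is proved, stated in full; the proofs are below) =====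
def Claim_equal_is_false_3prime_junction_py : Prop := ∀ (junc_start : Int) (junc_end : Int) (seq : String) (min_a_tract : Int), Dom_is_false_3prime_junction_py junc_start junc_end seq min_a_tract → Spec_is_false_3prime_junction_py junc_start junc_end seq min_a_tract (is_false_3prime_junction_py junc_start junc_end seq min_a_tract)

-- ===== LEMMAS AND PROOFS =====
theorem pvRunA_nonneg (l : List Char) : 0 ≤ pvRunA l := by
  induction l with
  | nil => simp [pvRunA]
  | cons c t ih => unfold pvRunA; split <;> omega

-- a run of ≥ k leading A's is exactly a replicate-k-'A' prefix of the uppercased list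
theorem pv_startswith_rep (l : List Char) (k : Nat) :
    PySem.Chars.startswith (l.map PySem.Chars.upperChar) (List.replicate k 'A')
      = decide ((k : Int) ≤ pvRunA l) := by
  induction l generalizing k with
  | nil =>
    cases k with
    | zero => simp [PySem.Chars.startswith, pvRunA]
    | succ k => simp [PySem.Chars.startswith, pvRunA, List.replicate]
  | cons c t ih =>
    cases k with
    | zero =>
      have := pvRunA_nonneg (c :: t)
      simp [PySem.Chars.startswith]
      omega
    | succ k =>
      by_cases h : PySem.Chars.upperChar c = 'A'
      · have h2 : PySem.Chars.startswith ((c :: t).map PySem.Chars.upperChar) (List.replicate (k + 1) 'A')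
            = PySem.Chars.startswith (t.map PySem.Chars.upperChar) (List.replicate k 'A') := by
          simp [PySem.Chars.startswith, List.replicate_succ, h]
        have h3 : pvRunA (c :: t) = 1 + pvRunA t := by simp [pvRunA, h]
        rw [h2, ih k, h3, decide_eq_decide]
        push_cast
        omega
      · have h2 : PySem.Chars.startswith ((c :: t).map PySem.Chars.upperChar) (List.replicate (k + 1) 'A') = false := by
          simp [PySem.Chars.startswith, List.replicate_succ, List.isPrefixOf]
          intro hc
          exact (h hc.symm).elim
        have h3 : pvRunA (c :: t) = 0 := by simp [pvRunA, h]
        rw [h2, h3, eq_comm, decide_eq_false_iff_not]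
        push_cast
        omega

theorem pv_endswith_rep (l : List Char) (k : Nat) :
    PySem.Chars.endswith (l.map PySem.Chars.upperChar) (List.replicate k 'A')
      = decide ((k : Int) ≤ pvRunA l.reverse) := by
  have : PySem.Chars.endswith (l.map PySem.Chars.upperChar) (List.replicate k 'A')
      = PySem.Chars.startswith (l.reverse.map PySem.Chars.upperChar) (List.replicate k 'A') := by
    simp [PySem.Chars.endswith, PySem.Chars.startswith, List.isSuffixOf]
  rw [this, pv_startswith_rep]

-- Python already clamps a slice's stop bound to the length: the explicit min is redundant
theorem pv_slice_min_stop {α : Type} (xs : List α) (a b : Int) :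
    PySem.List.slice xs (some a) (some (min (xs.length : Int) b)) = PySem.List.slice xs (some a) (some b) := by
  have h : PySem.List.clampIdx xs.length (min (xs.length : Int) b) = PySem.List.clampIdx xs.length b := by
    unfold PySem.List.clampIdx; split_ifs <;> omega
  simp [PySem.List.slice, h]

-- slicing commutes with the charwise map 'upper'
theorem pv_slice_map {α β : Type} (f : α → β) (xs : List α) (a? b? : Option Int) :
    PySem.List.slice (xs.map f) a? b? = (PySem.List.slice xs a? b?).map f := by
  simp [PySem.List.slice, List.map_take, List.map_drop]

theorem pv_decide_toNat (m : Int) (l : List Char) :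
    decide ((m.toNat : Int) ≤ pvRunA l) = decide (m ≤ pvRunA l) := by
  have := pvRunA_nonneg l
  rw [decide_eq_decide]
  omega

-- ===== VERDICT (by name: the statement is the Claim_ definition above) =====
theorem is_false_3prime_junction_py_spec : Claim_equal_is_false_3prime_junction_py := by
  intro js je seq mat _
  unfold Spec_is_false_3prime_junction_py is_false_3prime_junction_py is_false_3prime_junction_py_alt
  by_cases hg : js < 0 ∨ je > (seq.toList.length : Int)
  · rw [if_pos hg, if_pos hg]
  · rw [if_neg hg, if_neg hg, pv_slice_min_stop, PySem.List.pyRepeat_singleton]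
    unfold PySem.Chars.upper
    simp only [pv_slice_map, pv_endswith_rep, pv_startswith_rep, pv_decide_toNat]
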